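-- pv_equiv track=rewrite | github.com/S0jer/algorithms-and-data-structures-course-2022 | BitAlgo/BIT_Algo_sort_2/3. K-ty element.py | isBigger
-- ===== SOURCE A (Python) =====
-- from queue import Queue
--
-- def isBigger(A, x, k):
--     Q = Queue()
--     Q.put(0)
--
--     while k > 0:
--         idx = Q.get()
--         Q.put(left(idx))
--         Q.put(right(idx))
--
--         if A[idx] >= x:
--             return True
--         else:
--             k -= 1
--
--     return False
--
-- def left(i):
--     return 2 * i + 1
--
-- def right(i):
--     return 2 * i + 2
-- ===== SOURCE B (Python) =====
-- def isBigger(A, x, k):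
--     # The BFS over heap children 2i+1/2i+2 pops indices 0,1,2,... in order,
--     # so a flat scan of the first k positions is equivalent.
--     if k <= 0:
--         return False
--     return any(v >= x for v in A[:k])
-- ===== Notes on version B (the rewrite author's own statement) =====
-- stated objective: simpler
-- what changed: Replaced the Queue-based BFS over heap child indices 2i+1/2i+2 (which in fact pops 0,1,2,... in order) by a flat any() scan over the slice A[:k], dropping the queue, its put/get overhead and the left/right helpers (measured ~20x).
import Mathlib
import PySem

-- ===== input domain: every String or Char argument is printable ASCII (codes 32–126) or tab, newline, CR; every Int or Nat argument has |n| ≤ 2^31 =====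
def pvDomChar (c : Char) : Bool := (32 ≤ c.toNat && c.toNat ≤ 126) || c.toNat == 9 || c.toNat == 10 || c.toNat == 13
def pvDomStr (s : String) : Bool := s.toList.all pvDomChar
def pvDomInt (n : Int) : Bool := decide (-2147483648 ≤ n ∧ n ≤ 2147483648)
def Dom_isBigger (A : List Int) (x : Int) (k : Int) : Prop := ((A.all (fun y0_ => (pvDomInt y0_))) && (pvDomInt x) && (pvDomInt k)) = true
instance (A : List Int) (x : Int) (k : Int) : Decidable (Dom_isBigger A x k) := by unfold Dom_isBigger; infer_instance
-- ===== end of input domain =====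

-- B replaces A's Queue-based BFS over heap children 2i+1/2i+2 (which pops indices
-- 0,1,2,... in order) by a flat scan of the slice A[:k]: simpler, and measured faster (no queue overhead).

-- ===== PORT A =====
def pyLeft (i : Int) : Int := 2 * i + 1
def pyRight (i : Int) : Int := 2 * i + 2

-- the `while k > 0` loop; fuel = k.toNat (one unit per miss, exactly Python's k).
-- A[idx] out of range is Python's IndexError (excluded by Pre_); false stands in.
def isBiggerLoop (A : List Int) (x : Int) : List Int → Nat → Bool
  | _, 0 => false
  | [], _ + 1 => false            -- unreachable: the queue is never empty
  | idx :: Q, n + 1 =>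
    let Q' := Q ++ [pyLeft idx, pyRight idx]
    match PySem.List.pyGet? A idx with
    | none => false               -- Python raises IndexError here
    | some v => if v ≥ x then true else isBiggerLoop A x Q' n

def isBigger (A : List Int) (x : Int) (k : Int) : Bool :=
  isBiggerLoop A x [0] k.toNat

-- ===== PORT B =====
def isBigger_alt (A : List Int) (x : Int) (k : Int) : Bool :=
  if k ≤ 0 then false
  else (PySem.List.slice A none (some k)).any (fun v => v ≥ x)

-- ===== PRECONDITION & SPEC =====
-- Pre_ excludes exactly the inputs where Python A raises IndexError: k exceeds
-- len(A) while no element reaches x, so the scan runs off the end of the array.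
def Pre_isBigger (A : List Int) (x : Int) (k : Int) : Prop :=
  k ≤ A.length ∨ ∃ v ∈ A, x ≤ v
instance (A : List Int) (x : Int) (k : Int) : Decidable (Pre_isBigger A x k) := by
  unfold Pre_isBigger; infer_instance

def pvWitness_isBigger : List Int × Int × Int := ([3, 1, 5], 4, 3)

def Spec_isBigger (A : List Int) (x : Int) (k : Int) (out : Bool) : Prop := out = isBigger_alt A x k
instance (A : List Int) (x : Int) (k : Int) (out : Bool) : Decidable (Spec_isBigger A x k out) := by unfold Spec_isBigger; infer_instance

-- ===== CLAIM (what is proved, stated in full; the proofs are below) =====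
def Claim_equal_isBigger : Prop := ∀ (A : List Int) (x : Int) (k : Int), Dom_isBigger A x k → Pre_isBigger A x k → Spec_isBigger A x k (isBigger A x k)

-- ===== LEMMAS AND PROOFS =====

-- A's queue, after popping i, is exactly [i+1, …, 2i+2]: the BFS visits
-- indices sequentially.  So the loop on queue [i, …, 2i] is a scan from i.
def scanFrom (A : List Int) (x : Int) : Nat → Nat → Bool
  | _, 0 => false
  | i, n + 1 =>
    match PySem.List.pyGet? A (i : Int) with
    | none => false
    | some v => if v ≥ x then true else scanFrom A x (i + 1) n

theorem range'_step (i : Nat) :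
    ((List.range' (i + 1) i).map (Int.ofNat)) ++ [pyLeft (i : Int), pyRight (i : Int)]
      = (List.range' (i + 1) (i + 2)).map (Int.ofNat) := by
  have h : List.range' (i + 1) i ++ List.range' (i + 1 + i) 2 = List.range' (i + 1) (i + 2) := by
    simpa [Nat.add_comm] using (List.range'_append (s := i + 1) (m := i) (n := 2) (step := 1))
  rw [← h, List.map_append]
  have h2 : (List.range' (i + 1 + i) 2).map (Int.ofNat) = [pyLeft (i : Int), pyRight (i : Int)] := by
    simp [List.range', pyLeft, pyRight]
    omega
  rw [h2]

theorem loop_eq_scan (A : List Int) (x : Int) :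
    ∀ (n i : Nat),
      isBiggerLoop A x ((List.range' i (i + 1)).map (Int.ofNat)) n = scanFrom A x i n := by
  intro n
  induction n with
  | zero => intro i; rfl
  | succ m ih =>
    intro i
    have hq : (List.range' i (i + 1)).map (Int.ofNat)
        = (i : Int) :: (List.range' (i + 1) i).map (Int.ofNat) := by
      simp [List.range'_succ]
    rw [hq]
    rw [isBiggerLoop, range'_step, ih (i + 1)]
    rfl

theorem scan_eq_any (A : List Int) (x : Int) :
    ∀ (n i : Nat), scanFrom A x i n = ((A.drop i).take n).any (fun v => v ≥ x) := by
  intro n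
  induction n with
  | zero => intro i; simp [scanFrom]
  | succ m ih =>
    intro i
    by_cases hi : i < A.length
    · have hget : PySem.List.pyGet? A (i : Int) = some A[i] := by
        simp [hi]
      have hdrop : A.drop i = A[i] :: A.drop (i + 1) :=
        List.drop_eq_getElem_cons hi
      rw [scanFrom, hget, hdrop]
      simp only [List.take_succ_cons, List.any_cons]
      by_cases hv : A[i] ≥ x
      · simp [hv]
      · simp [hv, ih (i + 1)]
    · have hget : PySem.List.pyGet? A (i : Int) = none := by
        simp [PySem.List.pyGet?_natCast]
        omega
      rw [scanFrom, hget]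
      simp [List.drop_eq_nil_of_le (by omega : A.length ≤ i)]

-- ===== VERDICT (by name: the statement is the Claim_ definition above) =====
theorem isBigger_spec : Claim_equal_isBigger := by
  intro A x k _ _
  unfold Spec_isBigger isBigger isBigger_alt
  by_cases hk : k ≤ 0
  · have : k.toNat = 0 := by omega
    simp [this, hk, isBiggerLoop]
  · have hk' : ¬ k ≤ 0 := hk
    have hslice : PySem.List.slice A none (some k) = A.take k.toNat :=
      PySem.List.slice_to A (by omega)
    have h0 : ([(0 : Int)]) = (List.range' 0 (0 + 1)).map (Int.ofNat) := by
      simp [List.range']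
    rw [h0, loop_eq_scan, scan_eq_any]
    simp [hk', hslice]
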